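-- pv_equiv track=rewrite | github.com/twardoch/uutel | src/uutel/core/utils.py | merge_usage_stats
-- ===== SOURCE A (Python) =====
-- def merge_usage_stats(
--     existing: dict[str, int] | None,
--     delta: dict[str, int] | None,
-- ) -> dict[str, int] | None:
--     """Merge usage statistics while normalising token totals."""
--
--     if not existing and not delta:
--         return None
--
--     merged: dict[str, int] = {}
--     for source in (existing, delta):
--         if not source:
--             continue
--         for key, value in source.items():
--             if isinstance(value, int | float):
--                 merged[key] = merged.get(key, 0) + int(value)
--
--     merged.setdefault(
--         "total_tokens",
--         merged.get("prompt_tokens", 0) + merged.get("completion_tokens", 0),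
--     )
--     return merged
-- ===== SOURCE B (Python) =====
-- def merge_usage_stats(
--     existing: dict[str, int] | None,
--     delta: dict[str, int] | None,
-- ) -> dict[str, int] | None:
--     """Merge usage statistics while normalising token totals (key-union decomposition)."""
--     sources = [s for s in (existing, delta) if s]
--     if not sources:
--         return None
--
--     keys = list(dict.fromkeys(k for s in sources for k in s))
--     merged: dict[str, int] = {}
--     for k in keys:
--         total = None
--         for s in sources:
--             v = s.get(k)
--             if isinstance(v, (int, float)):
--                 total = (0 if total is None else total) + int(v)
--         if total is not None:
--             merged[k] = total
--
--     merged.setdefault(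
--         "total_tokens",
--         merged.get("prompt_tokens", 0) + merged.get("completion_tokens", 0),
--     )
--     return merged
-- ===== Notes on version B (the rewrite author's own statement) =====
-- stated objective: alternative
-- what changed: B first computes the ordered union of keys of the non-empty sources, then for each key sums the numeric contributions across the sources (per-key aggregation), instead of A's accumulate-into-a-dict pass over every item of each source; the Pre_ only restricts the Lean association lists to distinct keys, the shape every real Python dict has.
import Mathlib
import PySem

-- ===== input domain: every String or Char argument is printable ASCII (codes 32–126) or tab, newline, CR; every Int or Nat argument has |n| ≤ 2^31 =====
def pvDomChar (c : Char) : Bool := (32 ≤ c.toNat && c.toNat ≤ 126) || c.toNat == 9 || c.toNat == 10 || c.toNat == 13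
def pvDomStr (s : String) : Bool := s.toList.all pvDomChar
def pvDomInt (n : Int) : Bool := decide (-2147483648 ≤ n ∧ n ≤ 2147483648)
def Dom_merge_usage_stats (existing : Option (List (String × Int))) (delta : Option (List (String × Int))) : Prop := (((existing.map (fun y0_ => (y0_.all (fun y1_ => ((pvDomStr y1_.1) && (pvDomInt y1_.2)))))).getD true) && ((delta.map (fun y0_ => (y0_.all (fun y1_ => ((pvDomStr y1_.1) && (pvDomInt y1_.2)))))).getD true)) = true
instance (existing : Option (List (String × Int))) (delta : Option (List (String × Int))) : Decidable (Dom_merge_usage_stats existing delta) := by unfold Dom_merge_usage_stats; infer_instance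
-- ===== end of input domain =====

-- B replaces A's item-by-item accumulation into a dict by a per-key pass over the ordered union
-- of keys of the non-empty sources (alternative decomposition, same cost). Equivalence is proved
-- on association lists with distinct keys (the shape of every Python dict).

-- ===== PORT A =====
def merge_usage_stats (existing : Option (List (String × Int))) (delta : Option (List (String × Int))) : Option (List (String × Int)) :=
  -- if not existing and not delta: return None
  if (existing.getD []).isEmpty && (delta.getD []).isEmpty then none
  else
    -- merged = {}; for source in (existing, delta): if not source: continue
    --             for key, value in source.items(): merged[key] = merged.get(key, 0) + int(value)
    -- (values are ints on this domain, so the isinstance guard always holds and int(value) = value)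
    let merged : PySem.Dict String Int :=
      [existing, delta].foldl
        (fun m src =>
          match src with
          | none => m
          | some l =>
            if l.isEmpty then m
            else l.foldl (fun m kv => m.insert kv.1 (m.getD kv.1 0 + kv.2)) m)
        PySem.Dict.empty
    let merged := merged.setdefault "total_tokens"
        (merged.getD "prompt_tokens" 0 + merged.getD "completion_tokens" 0)
    some merged.items

-- ===== PORT B =====
-- total = None; for s in sources: v = s.get(k); if numeric: total = (0 if total is None else total) + int(v)
def bTotal (sources : List (List (String × Int))) (k : String) : Option Int :=
  sources.foldl
    (fun t s =>
      match (PySem.Dict.mk s).get? k with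
      | some v => some (t.getD 0 + v)
      | none => t)
    none

def merge_usage_stats_alt (existing : Option (List (String × Int))) (delta : Option (List (String × Int))) : Option (List (String × Int)) :=
  -- sources = [s for s in (existing, delta) if s]
  let sources : List (List (String × Int)) :=
    [existing, delta].filterMap
      (fun s =>
        match s with
        | none => none
        | some l => if l.isEmpty then none else some l)
  if sources.isEmpty then none
  else
    -- keys = list(dict.fromkeys(k for s in sources for k in s))
    let keys := PySem.List.dedup (sources.flatMap (fun s => s.map Prod.fst))
    -- for k in keys: … if total is not None: merged[k] = total
    let merged : PySem.Dict String Int :=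
      keys.foldl
        (fun m k =>
          match bTotal sources k with
          | some t => m.insert k t
          | none => m)
        PySem.Dict.empty
    let merged := merged.setdefault "total_tokens"
        (merged.getD "prompt_tokens" 0 + merged.getD "completion_tokens" 0)
    some merged.items

-- ===== PRECONDITION & SPEC =====
-- Pre_ restricts each association list to distinct keys: exactly the lists that represent a
-- Python dict (A's parameters are dicts, which cannot carry duplicate keys).
def Pre_merge_usage_stats (existing : Option (List (String × Int))) (delta : Option (List (String × Int))) : Prop :=
  ((existing.getD []).map Prod.fst).Nodup ∧ ((delta.getD []).map Prod.fst).Nodup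
instance (existing : Option (List (String × Int))) (delta : Option (List (String × Int))) : Decidable (Pre_merge_usage_stats existing delta) := by unfold Pre_merge_usage_stats; infer_instance

def pvWitness_merge_usage_stats : (Option (List (String × Int))) × (Option (List (String × Int))) :=
  (some [("prompt_tokens", 3), ("completion_tokens", 4)], none)

def Spec_merge_usage_stats (existing : Option (List (String × Int))) (delta : Option (List (String × Int))) (out : Option (List (String × Int))) : Prop := out = merge_usage_stats_alt existing delta
instance (existing : Option (List (String × Int))) (delta : Option (List (String × Int))) (out : Option (List (String × Int))) : Decidable (Spec_merge_usage_stats existing delta out) := by unfold Spec_merge_usage_stats; infer_instance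

-- ===== CLAIM (what is proved, stated in full; the proofs are below) =====
def Claim_equal_merge_usage_stats : Prop := ∀ (existing : Option (List (String × Int))) (delta : Option (List (String × Int))), Dom_merge_usage_stats existing delta → Pre_merge_usage_stats existing delta → Spec_merge_usage_stats existing delta (merge_usage_stats existing delta)

-- ===== LEMMAS AND PROOFS =====

-- sum of the values carried by key k in an item list
def sumv (L : List (String × Int)) (k : String) : Int :=
  ((L.filter (fun p => p.1 == k)).map Prod.snd).sum

lemma sumv_nil (k : String) : sumv [] k = 0 := rfl

lemma sumv_cons (a : String × Int) (L : List (String × Int)) (k : String) :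
    sumv (a :: L) k = (if a.1 = k then a.2 else 0) + sumv L k := by
  by_cases h : a.1 = k <;> simp [sumv, h]

lemma sumv_append (L₁ L₂ : List (String × Int)) (k : String) :
    sumv (L₁ ++ L₂) k = sumv L₁ k + sumv L₂ k := by
  simp [sumv, List.filter_append]

lemma sumv_eq_zero {L : List (String × Int)} {k : String} (h : k ∉ L.map Prod.fst) :
    sumv L k = 0 := by
  induction L with
  | nil => rfl
  | cons a L ih =>
    simp only [List.map_cons, List.mem_cons, not_or] at h
    rw [sumv_cons, ih h.2, if_neg (fun e => h.1 e.symm)]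
    ring

lemma getD_afold (L : List (String × Int)) :
    ∀ (m : PySem.Dict String Int) (k : String),
      (L.foldl (fun m kv => m.insert kv.1 (m.getD kv.1 0 + kv.2)) m).getD k 0
        = m.getD k 0 + sumv L k := by
  induction L with
  | nil => intro m k; simp [sumv_nil]
  | cons a L ih =>
    intro m k
    rw [List.foldl_cons, ih, sumv_cons, PySem.Dict.getD_insert]
    by_cases h : k = a.1
    · subst h; simp; ring
    · rw [if_neg h, if_neg (fun e => h e.symm)]; ring

lemma keys_afold (L : List (String × Int)) (m : PySem.Dict String Int) :
    (L.foldl (fun m kv => m.insert kv.1 (m.getD kv.1 0 + kv.2)) m).keys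
      = PySem.Set.update m.keys (L.map Prod.fst) := by
  exact PySem.Dict.keys_foldl_insert_key L Prod.fst (fun d x => d.getD x.1 0 + x.2) m

lemma nodup_keys_afold (L : List (String × Int)) :
    ((L.foldl (fun m kv => m.insert kv.1 (m.getD kv.1 0 + kv.2)) PySem.Dict.empty)).keys.Nodup := by
  exact PySem.Dict.nodup_keys_foldl_insert_key L Prod.fst _ _ (by simp)

lemma get?_mk_nodup (k : String) :
    ∀ (s : List (String × Int)), (s.map Prod.fst).Nodup →
      (PySem.Dict.mk s).get? k = if k ∈ s.map Prod.fst then some (sumv s k) else none := by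
  intro s
  induction s with
  | nil => intro _; simp [PySem.Dict.get?]
  | cons a s ih =>
    intro hnd
    simp only [List.map_cons, List.nodup_cons] at hnd
    rw [PySem.Dict.get?_mk_cons, ih hnd.2, sumv_cons]
    by_cases h : a.1 = k
    · subst h
      rw [sumv_eq_zero hnd.1]
      simp
    · have hne : (a.1 == k) = false := by simp [h]
      have h3 : (k ∈ a.1 :: List.map Prod.fst s) ↔ k ∈ List.map Prod.fst s :=
        ⟨fun hm => (List.mem_cons.mp hm).resolve_left (fun e => h e.symm),
         fun hm => List.mem_cons_of_mem _ hm⟩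
      simp only [hne, Bool.false_eq_true, if_false, if_neg h, zero_add]
      rw [List.map_cons, if_congr h3 rfl rfl]

lemma bTotal_aux (k : String) :
    ∀ (srcs : List (List (String × Int))), (∀ s ∈ srcs, (s.map Prod.fst).Nodup) →
      ∀ (t : Option Int),
        srcs.foldl
          (fun t s =>
            match (PySem.Dict.mk s).get? k with
            | some v => some (t.getD 0 + v)
            | none => t) t
        = if k ∈ (srcs.flatMap id).map Prod.fst
          then some (t.getD 0 + sumv (srcs.flatMap id) k)
          else t := by
  intro srcs
  induction srcs with
  | nil => intro _ t; simp [sumv_nil]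
  | cons s srcs ih =>
    intro hnd t
    have hs : (s.map Prod.fst).Nodup := hnd s (by simp)
    have hrest : ∀ u ∈ srcs, (u.map Prod.fst).Nodup := fun u hu => hnd u (by simp [hu])
    rw [List.foldl_cons, get?_mk_nodup k s hs]
    by_cases h : k ∈ s.map Prod.fst
    · rw [if_pos h]
      rw [ih hrest (some (t.getD 0 + sumv s k))]
      have hmem : k ∈ ((s :: srcs).flatMap id).map Prod.fst := by
        simp only [List.flatMap_cons, id, List.map_append, List.mem_append]
        exact Or.inl h
      rw [if_pos hmem]
      by_cases h2 : k ∈ (srcs.flatMap id).map Prod.fst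
      · rw [if_pos h2]
        simp only [List.flatMap_cons, id, sumv_append, Option.getD_some]
        ring_nf
      · rw [if_neg h2]
        simp only [List.flatMap_cons, id, sumv_append, sumv_eq_zero h2]
        ring_nf
    · rw [if_neg h, ih hrest t]
      by_cases h2 : k ∈ (srcs.flatMap id).map Prod.fst
      · have hmem : k ∈ ((s :: srcs).flatMap id).map Prod.fst := by
          simp only [List.flatMap_cons, id, List.map_append, List.mem_append]
          exact Or.inr h2
        rw [if_pos h2, if_pos hmem]
        simp only [List.flatMap_cons, id, sumv_append, sumv_eq_zero h]
        ring_nf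
      · have hmem : k ∉ ((s :: srcs).flatMap id).map Prod.fst := by
          simp only [List.flatMap_cons, id, List.map_append, List.mem_append]
          tauto
        rw [if_neg h2, if_neg hmem]

-- A's inner accumulation over the non-empty sources equals one accumulation over their concatenation
lemma aout (opts : List (Option (List (String × Int)))) :
    ∀ (m : PySem.Dict String Int),
      opts.foldl
        (fun m src =>
          match src with
          | none => m
          | some l =>
            if l.isEmpty then m
            else l.foldl (fun m kv => m.insert kv.1 (m.getD kv.1 0 + kv.2)) m) m
      = ((opts.filterMap
            (fun s =>
              match s with
              | none => none
              | some l => if l.isEmpty then none else some l)).flatMap id).foldl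
          (fun m kv => m.insert kv.1 (m.getD kv.1 0 + kv.2)) m := by
  induction opts with
  | nil => intro m; rfl
  | cons o opts ih =>
    intro m
    cases o with
    | none => simpa using ih m
    | some l =>
      by_cases hl : l.isEmpty
      · simp only [List.foldl_cons, List.filterMap_cons, hl, if_true]
        exact ih m
      · simp only [List.foldl_cons, List.filterMap_cons, hl, Bool.false_eq_true, if_false,
          List.flatMap_cons, id, List.foldl_append]
        exact ih _

-- the core: A's merged dict equals B's merged dict, item list included
lemma merged_eq (srcs : List (List (String × Int)))
    (hnd : ∀ s ∈ srcs, (s.map Prod.fst).Nodup) :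
    ((srcs.flatMap id).foldl (fun m kv => m.insert kv.1 (m.getD kv.1 0 + kv.2)) PySem.Dict.empty)
    = (PySem.List.dedup (srcs.flatMap (fun s => s.map Prod.fst))).foldl
        (fun m k =>
          match bTotal srcs k with
          | some t => m.insert k t
          | none => m)
        PySem.Dict.empty := by
  set L : List (String × Int) := srcs.flatMap id with hL
  have hmapL : L.map Prod.fst = srcs.flatMap (fun s => s.map Prod.fst) := by
    simp [hL, List.flatMap_def]
  set keys := PySem.List.dedup (srcs.flatMap (fun s => s.map Prod.fst)) with hkeys
  have hkmem : ∀ k ∈ keys, k ∈ L.map Prod.fst := by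
    intro k hk
    rw [hmapL]
    exact (PySem.List.mem_dedup _ _).mp hk
  -- B's fold, with bTotal evaluated
  have hB : keys.foldl
      (fun m k =>
        match bTotal srcs k with
        | some t => m.insert k t
        | none => m) PySem.Dict.empty
      = keys.foldl (fun m k => m.insert k (sumv L k)) PySem.Dict.empty := by
    apply PySem.List.foldl_congr_mem
    intro m k hk
    have hb := bTotal_aux k srcs hnd none
    unfold bTotal
    rw [hb, if_pos (hkmem k hk)]
    simp [hL]
  rw [hB]
  have hfresh : (keys.foldl (fun m k => m.insert k (sumv L k)) PySem.Dict.empty).items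
      = (PySem.Dict.empty : PySem.Dict String Int).items ++ keys.map (fun k => (k, sumv L k)) := by
    exact PySem.Dict.items_foldl_insert_fresh keys id (fun k => sumv L k) _
      (fun a _ => by simp) (by simpa using PySem.List.nodup_dedup _)
  apply PySem.Dict.ext
  rw [hfresh]
  have hndA := nodup_keys_afold L
  rw [PySem.Dict.items_eq_map_keys _ hndA 0]
  have hkeysA : (L.foldl (fun m kv => m.insert kv.1 (m.getD kv.1 0 + kv.2)) PySem.Dict.empty).keys
      = keys := by
    rw [keys_afold]
    have he : (PySem.Dict.empty : PySem.Dict String Int).keys = ([] : List String) := rfl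
    rw [he, PySem.Set.update_nil_left, hkeys, ← hmapL, PySem.List.dedup_eq_ofList]
  rw [hkeysA]
  have he : (PySem.Dict.empty : PySem.Dict String Int).items = ([] : List (String × Int)) := rfl
  rw [he, List.nil_append]
  apply List.map_congr_left
  intro k _
  rw [getD_afold]
  simp

-- the non-None guard: "not existing and not delta" iff the filtered source list is empty
lemma sources_empty_iff (existing delta : Option (List (String × Int))) :
    (([existing, delta].filterMap
        (fun s =>
          match s with
          | none => none
          | some l => if l.isEmpty then none else some l)).isEmpty)
      = ((existing.getD []).isEmpty && (delta.getD []).isEmpty) := by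
  cases existing with
  | none =>
    cases delta with
    | none => rfl
    | some b => cases b <;> rfl
  | some a =>
    cases delta with
    | none => cases a <;> rfl
    | some b => cases a <;> cases b <;> rfl

-- ===== VERDICT (by name: the statement is the Claim_ definition above) =====
theorem merge_usage_stats_spec : Claim_equal_merge_usage_stats := by
  intro existing delta _ hpre
  unfold Spec_merge_usage_stats merge_usage_stats merge_usage_stats_alt
  simp only []
  by_cases hc : ((existing.getD []).isEmpty && (delta.getD []).isEmpty) = true
  · rw [if_pos hc, if_pos (by rw [sources_empty_iff]; exact hc)]
  · rw [if_neg hc, if_neg (by rw [sources_empty_iff]; exact hc)]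
    have hnd : ∀ s ∈ [existing, delta].filterMap
        (fun s =>
          match s with
          | none => none
          | some l => if l.isEmpty then none else some l), (s.map Prod.fst).Nodup := by
      intro s hs
      rw [List.mem_filterMap] at hs
      obtain ⟨o, ho, he⟩ := hs
      have key : ∀ (o : Option (List (String × Int))), ((o.getD []).map Prod.fst).Nodup →
          (match o with
           | none => none
           | some l => if l.isEmpty then none else some l) = some s →
          (s.map Prod.fst).Nodup := by
        intro o hno he
        cases o with
        | none => simp at he
        | some l =>
          simp only [Option.getD_some] at hno
          by_cases hl : l.isEmpty <;> simp [hl] at he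
          exact he ▸ hno
      simp only [List.mem_cons, List.not_mem_nil, or_false] at ho
      rcases ho with h1 | h1
      · exact key o (h1 ▸ hpre.1) he
      · exact key o (h1 ▸ hpre.2) he
    rw [aout, merged_eq _ hnd]
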